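-- pv_equiv track=rewrite | github.com/nazarblch/4context | polls/views.py | k_set_factorial
-- ===== SOURCE A (Python) =====
-- def k_set_factorial(ind, words, k):
--
-- 	if ind == k-1:
-- 		return [ w for w in words ]
--
-- 	else:
--
-- 		arr = []
-- 		i = 1
-- 		for w in words:
-- 			if i < len(words):
-- 				for w1 in k_set_factorial(ind+1, words[i:], k):
-- 					arr.append(w+" "+w1)
-- 			else:
-- 				arr.append(w)
--
-- 			i = i + 1
-- 		return arr
-- ===== SOURCE B (Python) =====
-- def k_set_factorial(ind, words, k):
--     """All phrases built by picking words left to right: a phrase starts at any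
--     position, repeatedly jumps to a strictly later position, and is complete once
--     it holds k - ind words or reaches the last word of the list."""
--     n = len(words)
--
--     def phrase(j, g):
--         if g == 1 or j == n - 1:
--             return [words[j]]
--         return [words[j] + " " + s for i in range(j + 1, n) for s in phrase(i, g - 1)]
--
--     return [s for j in range(n) for s in phrase(j, k - ind)]
-- ===== Notes on version B (the rewrite author's own statement) =====
-- stated objective: simpler
-- what changed: Replaces A's recursion over sliced word lists with an explicit counter by a single index-based helper phrase(j, g) enumerating, via comprehensions, the phrases starting at each position with a word budget; no list slicing and no counter bookkeeping.
import Mathlib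
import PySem

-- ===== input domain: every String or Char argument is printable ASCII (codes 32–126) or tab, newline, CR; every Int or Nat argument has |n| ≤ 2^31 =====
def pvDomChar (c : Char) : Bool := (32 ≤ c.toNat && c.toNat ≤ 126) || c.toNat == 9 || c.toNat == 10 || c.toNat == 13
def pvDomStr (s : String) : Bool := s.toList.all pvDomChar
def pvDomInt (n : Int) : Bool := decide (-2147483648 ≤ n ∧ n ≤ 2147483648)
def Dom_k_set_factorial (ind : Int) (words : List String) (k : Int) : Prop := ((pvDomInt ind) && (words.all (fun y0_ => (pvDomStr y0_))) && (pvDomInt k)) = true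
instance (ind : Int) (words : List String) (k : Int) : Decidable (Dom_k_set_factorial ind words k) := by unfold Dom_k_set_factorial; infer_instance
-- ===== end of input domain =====

-- B replaces A's recursion over sliced word lists (with a manual counter) by a single
-- index-based helper enumerating the phrases starting at each position (objective: simpler).

-- ===== PORT A =====
-- literal transliteration of A: base case returns a copy of words; otherwise the loop
-- over words (kA_loop) recurses on the slice words[i:] (= the tail after each word).
mutual
def k_set_factorial (ind : Int) (words : List String) (k : Int) : List String :=
  if ind = k - 1 then
    words.map (fun w => w)
  else
    kA_loop ind words k
termination_by 2 * words.length + 1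

def kA_loop (ind : Int) (ws : List String) (k : Int) : List String :=
  match ws with
  | [] => []
  | w :: rest =>
    (if 0 < rest.length then
        (k_set_factorial (ind + 1) rest k).map (fun w1 => w ++ " " ++ w1)
      else [w]) ++ kA_loop ind rest k
termination_by 2 * ws.length
end

-- ===== PORT B =====
-- phrase(j, g) of Source B; 'for i in range(j+1, n)' is ported as the offsets d into
-- List.range (n - (j+1)) with i = j+1+d (attach only carries the termination bound).
-- Source B's words[j] is always in range where phrase is called, so getD is exact there.
def kB_phrase (words : List String) (j : Nat) (g : Int) : List String :=
  if g = 1 ∨ j = words.length - 1 then [words.getD j ""]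
  else
    (List.range (words.length - (j + 1))).attach.flatMap
      (fun d => (kB_phrase words (j + 1 + d.1) (g - 1)).map
        (fun s => words.getD j "" ++ " " ++ s))
termination_by words.length - j
decreasing_by
  have := List.mem_range.mp d.2
  omega

def k_set_factorial_alt (ind : Int) (words : List String) (k : Int) : List String :=
  (List.range words.length).flatMap (fun j => kB_phrase words j (k - ind))

-- ===== PRECONDITION & SPEC =====
def Spec_k_set_factorial (ind : Int) (words : List String) (k : Int) (out : List String) : Prop := out = k_set_factorial_alt ind words k
instance (ind : Int) (words : List String) (k : Int) (out : List String) : Decidable (Spec_k_set_factorial ind words k out) := by unfold Spec_k_set_factorial; infer_instance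

-- ===== CLAIM (what is proved, stated in full; the proofs are below) =====
def Claim_equal_k_set_factorial : Prop := ∀ (ind : Int) (words : List String) (k : Int), Dom_k_set_factorial ind words k → Spec_k_set_factorial ind words k (k_set_factorial ind words k)

-- ===== LEMMAS AND PROOFS =====

-- tail family: strings " w_{j1} w_{j2} …" continuing a phrase whose last index is l,
-- choosing g more indices (g = 0: nothing more; last index n-1: forced stop)
def pvTail (words : List String) (g : Int) (l : Nat) : List String :=
  if g = 0 ∨ words.length - 1 ≤ l then [""]
  else
    (List.range (words.length - 1 - l)).attach.flatMap
      (fun d => (pvTail words (g - 1) (l + 1 + d.1)).map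
        (fun s => " " ++ words.getD (l + 1 + d.1) "" ++ s))
termination_by words.length - l
decreasing_by
  have hd := List.mem_range.mp d.2
  omega

-- contribution of the word at global index j inside A's loop
def pvContrib (words : List String) (ind k : Int) (j : Nat) : List String :=
  if j + 1 < words.length then
    (k_set_factorial (ind + 1) (words.drop (j + 1)) k).map
      (fun w1 => words.getD j "" ++ " " ++ w1)
  else [words.getD j ""]

theorem pvDrop_as_range (words : List String) (l : Nat) :
    words.drop l = (List.range (words.length - l)).map (fun d => words.getD (l + d) "") := by
  induction words generalizing l with
  | nil => simp
  | cons w ws ih =>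
    cases l with
    | zero =>
      rw [List.drop_zero]
      simp only [List.length_cons, Nat.sub_zero]
      rw [List.range_succ_eq_map]
      simp only [List.map_cons, List.map_map]
      rw [show (w :: ws).getD (0 + 0) "" = w from rfl]
      congr 1
      · conv_lhs => rw [show ws = ws.drop 0 from rfl, ih 0]
        apply List.map_congr_left
        intro d _
        simp [Function.comp]
    | succ l =>
      rw [List.drop_succ_cons, ih l]
      rw [show (w :: ws).length - (l + 1) = ws.length - l from by simp]
      apply List.map_congr_left
      intro d _
      rw [show l + 1 + d = (l + d) + 1 from by omega]
      simp

theorem pvLoop_as_flatMap (words : List String) (ind k : Int) (l : Nat) :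
    kA_loop ind (words.drop l) k
      = (List.range (words.length - l)).flatMap (fun d => pvContrib words ind k (l + d)) := by
  have main : ∀ N l ind k, words.length - l ≤ N →
      kA_loop ind (words.drop l) k
        = (List.range (words.length - l)).flatMap (fun d => pvContrib words ind k (l + d)) := by
    intro N
    induction N with
    | zero =>
      intro l ind k hN
      have hle : words.length ≤ l := by omega
      rw [List.drop_eq_nil_of_le hle, Nat.sub_eq_zero_of_le hle]
      simp [kA_loop]
    | succ N ih =>
      intro l ind k hN
      by_cases hl : words.length ≤ l
      · rw [List.drop_eq_nil_of_le hl, Nat.sub_eq_zero_of_le hl]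
        simp [kA_loop]
      · have hl' : l < words.length := by omega
        have hdrop : words.drop l = words[l]'hl' :: words.drop (l + 1) :=
          List.drop_eq_getElem_cons hl'
        rw [hdrop, kA_loop]
        rw [show words.length - l = (words.length - (l + 1)) + 1 from by omega,
          List.range_succ_eq_map, List.flatMap_cons]
        congr 1
        · unfold pvContrib
          rw [List.length_drop]
          rw [show l + 0 = l from rfl]
          rw [List.getD_eq_getElem words "" hl']
          by_cases h1 : l + 1 < words.length
          · rw [if_pos (by omega : 0 < words.length - (l + 1)), if_pos h1]
          · rw [if_neg (by omega : ¬ 0 < words.length - (l + 1)), if_neg h1]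
        · rw [List.flatMap_map, ih (l + 1) ind k (by omega)]
          apply List.flatMap_congr
          intro d _
          rw [show l + d.succ = l + 1 + d from by omega]
  exact main (words.length - l) l ind k (le_refl _)

theorem pvTail_base (words : List String) (g : Int) (l : Nat)
    (h : g = 0 ∨ words.length - 1 ≤ l) : pvTail words g l = [""] := by
  rw [pvTail, if_pos h]

theorem pvTail_expand (words : List String) (g : Int) (l : Nat)
    (hg : g ≠ 0) (hl : ¬ words.length - 1 ≤ l) :
    pvTail words g l = (List.range (words.length - 1 - l)).flatMap
      (fun d => (pvTail words (g - 1) (l + 1 + d)).map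
        (fun s => " " ++ words.getD (l + 1 + d) "" ++ s)) := by
  rw [pvTail, if_neg (by tauto)]
  conv_rhs => rw [← List.attach_map_subtype_val (List.range (words.length - 1 - l))]
  rw [List.flatMap_map]

theorem pvTail_eq_A (words : List String) (ind k : Int) (l : Nat)
    (hl : l + 1 < words.length) (hg : k - ind ≠ 0) :
    pvTail words (k - ind) l
      = (k_set_factorial ind (words.drop (l + 1)) k).map (fun s => " " ++ s) := by
  have main : ∀ N l ind k, words.length - l ≤ N → l + 1 < words.length → k - ind ≠ 0 →
      pvTail words (k - ind) l
        = (k_set_factorial ind (words.drop (l + 1)) k).map (fun s => " " ++ s) := by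
    intro N
    induction N with
    | zero => intro l ind k hN hl hg; omega
    | succ N ih =>
      intro l ind k hN hl hg
      by_cases hbase : ind = k - 1
      · -- A's base case: each remaining word alone
        have hg1 : k - ind = 1 := by omega
        rw [k_set_factorial, if_pos hbase, hg1,
          pvTail_expand words 1 l one_ne_zero (by omega)]
        have hmap : (words.drop (l + 1)).map (fun w => w) = words.drop (l + 1) := by simp
        rw [hmap]
        conv_rhs => rw [pvDrop_as_range words (l + 1)]
        rw [List.map_map,
          show words.length - 1 - l = words.length - (l + 1) from by omega]
        conv_rhs => rw [List.map_eq_flatMap]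
        apply List.flatMap_congr
        intro d _
        rw [pvTail_base words (1 - 1) (l + 1 + d) (Or.inl (by norm_num))]
        simp [String.append_empty]
      · -- A's recursive case
        rw [k_set_factorial, if_neg hbase, pvLoop_as_flatMap words ind k (l + 1),
          pvTail_expand words (k - ind) l hg (by omega), List.map_flatMap,
          show words.length - 1 - l = words.length - (l + 1) from by omega]
        apply List.flatMap_congr
        intro d hd
        have hd' : d < words.length - (l + 1) := List.mem_range.mp hd
        unfold pvContrib
        by_cases hj : (l + 1 + d) + 1 < words.length
        · rw [if_pos hj]
          have hrec := ih (l + 1 + d) (ind + 1) k (by omega) hj (by omega)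
          rw [show k - ind - 1 = k - (ind + 1) from by ring, hrec,
            List.map_map, List.map_map]
          apply List.map_congr_left
          intro s _
          show " " ++ words.getD (l + 1 + d) "" ++ (" " ++ s)
            = " " ++ (words.getD (l + 1 + d) "" ++ " " ++ s)
          rw [String.append_assoc, String.append_assoc]
        · rw [if_neg hj,
            pvTail_base words (k - ind - 1) (l + 1 + d) (Or.inr (by omega))]
          simp [String.append_empty]
  exact main (words.length - l) l ind k (le_refl _) hl hg

theorem kB_phrase_expand (words : List String) (j : Nat) (g : Int)
    (hg : g ≠ 1) (hj : j ≠ words.length - 1) :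
    kB_phrase words j g = (List.range (words.length - (j + 1))).flatMap
      (fun d => (kB_phrase words (j + 1 + d) (g - 1)).map
        (fun s => words.getD j "" ++ " " ++ s)) := by
  rw [kB_phrase, if_neg (by tauto)]
  conv_rhs => rw [← List.attach_map_subtype_val (List.range (words.length - (j + 1)))]
  rw [List.flatMap_map]

-- B's phrase(j, g) is the word at j followed by every tail with budget g - 1
theorem kB_phrase_eq_tail (words : List String) (j : Nat) (g : Int)
    (hj : j < words.length) :
    kB_phrase words j g
      = (pvTail words (g - 1) j).map (fun s => words.getD j "" ++ s) := by
  have main : ∀ N (j : Nat) (g : Int), j < words.length → words.length - j ≤ N →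
      kB_phrase words j g
        = (pvTail words (g - 1) j).map (fun s => words.getD j "" ++ s) := by
    intro N
    induction N with
    | zero => intro j g hj hN; omega
    | succ N ih =>
      intro j g hj hN
      by_cases hstop : g = 1 ∨ j = words.length - 1
      · rw [kB_phrase, if_pos hstop,
          pvTail_base words (g - 1) j (by omega)]
        simp [String.append_empty]
      · push_neg at hstop
        rw [kB_phrase_expand words j g hstop.1 hstop.2,
          pvTail_expand words (g - 1) j (by omega) (by omega),
          List.map_flatMap,
          show words.length - 1 - j = words.length - (j + 1) from by omega]
        apply List.flatMap_congr
        intro d hd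
        have hd' : d < words.length - (j + 1) := List.mem_range.mp hd
        rw [ih (j + 1 + d) (g - 1) (by omega) (by omega),
          show g - 1 - 1 = g - 2 from by ring, List.map_map, List.map_map]
        apply List.map_congr_left
        intro s _
        show words.getD j "" ++ " " ++ (words.getD (j + 1 + d) "" ++ s)
          = words.getD j "" ++ (" " ++ words.getD (j + 1 + d) "" ++ s)
        rw [String.append_assoc, String.append_assoc]
  exact main (words.length - j) j g hj (le_refl _)

theorem pvAB (ind : Int) (words : List String) (k : Int) :
    k_set_factorial ind words k = k_set_factorial_alt ind words k := by
  have hB : k_set_factorial_alt ind words k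
      = (List.range words.length).flatMap
          (fun j => (pvTail words (k - ind - 1) j).map (fun s => words.getD j "" ++ s)) := by
    unfold k_set_factorial_alt
    apply List.flatMap_congr
    intro j hj
    exact kB_phrase_eq_tail words j (k - ind) (List.mem_range.mp hj)
  by_cases hbase : ind = k - 1
  · rw [k_set_factorial, if_pos hbase, hB,
      show k - ind - 1 = 0 from by omega]
    have hL : words.map (fun w => w) = words := by simp
    rw [hL]
    conv_lhs => rw [show words = words.drop 0 from rfl, pvDrop_as_range words 0]
    rw [List.map_eq_flatMap, Nat.sub_zero]
    apply List.flatMap_congr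
    intro j _
    rw [pvTail_base words 0 j (Or.inl rfl)]
    simp [String.append_empty]
  · rw [k_set_factorial, if_neg hbase, hB]
    have hA := pvLoop_as_flatMap words ind k 0
    rw [List.drop_zero, Nat.sub_zero] at hA
    rw [hA]
    apply List.flatMap_congr
    intro j hj
    have hj' : j < words.length := List.mem_range.mp hj
    rw [Nat.zero_add]
    unfold pvContrib
    by_cases hjn : j + 1 < words.length
    · rw [if_pos hjn]
      have hrec := pvTail_eq_A words (ind + 1) k j hjn (by omega)
      rw [show k - ind - 1 = k - (ind + 1) from by ring, hrec, List.map_map]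
      apply List.map_congr_left
      intro s _
      show words.getD j "" ++ " " ++ s = words.getD j "" ++ (" " ++ s)
      rw [String.append_assoc]
    · rw [if_neg hjn,
        pvTail_base words (k - ind - 1) j (Or.inr (by omega))]
      simp [String.append_empty]

-- ===== VERDICT (by name: the statement is the Claim_ definition above) =====
theorem k_set_factorial_spec : Claim_equal_k_set_factorial := by
  intro ind words k _
  unfold Spec_k_set_factorial
  exact pvAB ind words k
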